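-- pv_equiv track=rewrite | github.com/ckallum/Daily-Coding-Problem | solutions/#160.py | bfs
-- ===== SOURCE A (Python) =====
-- def bfs(graph, current, current_sum, visited):
--     if current not in graph:
--         return current_sum
--     visited.append(current)
--     max_path = current_sum
--     for neighbour in graph[current]:
--         if neighbour not in visited:
--             max_path = max(max_path, bfs(graph, neighbour, current_sum + graph[current][neighbour], visited))
--     return max_path
-- ===== SOURCE B (Python) =====
-- def bfs(graph, current, current_sum, visited):
--     # Iterative DFS with an explicit stack of (node, accumulated_sum) pairs:
--     # collect every accumulated sum reached into `sums`, then return max(sums).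
--     # Appends to the caller's `visited` in the same preorder as A does.
--     if current not in graph:
--         return current_sum
--     visited.append(current)
--     sums = [current_sum]
--     stack = [(n, current_sum + graph[current][n]) for n in reversed(list(graph[current]))]
--     while stack:
--         node, acc = stack.pop()
--         if node in visited:
--             continue
--         if node not in graph:
--             sums.append(acc)
--             continue
--         visited.append(node)
--         sums.append(acc)
--         stack.extend((n, acc + graph[node][n]) for n in reversed(list(graph[node])))
--     return max(sums)
-- ===== Notes on version B (the rewrite author's own statement) =====
-- stated objective: alternative
-- what changed: Replaces A's recursion with a running max by an iterative DFS over an explicit stack of (node, accumulated_sum) pairs that collects every reached sum into a list and takes max(sums) at the end; neighbours are pushed in reverse so the LIFO stack reproduces A's preorder, and in-graph nodes are appended to the caller's visited list in the same order.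
import Mathlib
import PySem

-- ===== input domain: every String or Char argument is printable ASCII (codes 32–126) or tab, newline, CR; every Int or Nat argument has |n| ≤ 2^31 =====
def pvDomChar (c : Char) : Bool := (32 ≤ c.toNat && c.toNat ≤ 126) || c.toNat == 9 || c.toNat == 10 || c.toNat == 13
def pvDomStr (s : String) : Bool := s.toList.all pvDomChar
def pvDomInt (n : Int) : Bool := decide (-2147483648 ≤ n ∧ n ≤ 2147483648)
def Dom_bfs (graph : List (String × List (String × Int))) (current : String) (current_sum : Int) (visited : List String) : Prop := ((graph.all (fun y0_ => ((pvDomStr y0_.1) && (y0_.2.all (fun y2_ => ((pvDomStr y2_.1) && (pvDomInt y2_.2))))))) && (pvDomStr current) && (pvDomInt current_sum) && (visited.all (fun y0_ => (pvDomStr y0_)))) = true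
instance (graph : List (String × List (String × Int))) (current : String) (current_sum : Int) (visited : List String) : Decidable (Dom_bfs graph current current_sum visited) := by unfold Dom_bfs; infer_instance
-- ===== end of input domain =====

-- B replaces A's recursion-with-running-max by an iterative DFS over an explicit stack of
-- (node, acc) pairs that COLLECTS every reached sum into a list and takes max(sums) at the
-- end (objective: alternative decomposition, same cost). A mutates `visited` in place and
-- the ports thread it as a value, so the equivalence proved is about the RETURN value
-- (B performs the same mutation in Python).

-- first-match association-list lookup (Python's dict indexing on the assoc-list encoding)
def pvGetNbrs? (g : List (String × List (String × Int))) (k : String) : Option (List (String × Int)) :=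
  match g with
  | [] => none
  | (k', nv) :: rest => if k' = k then some nv else pvGetNbrs? rest k

-- termination measure: number of graph keys not yet in visited
def pvMu (g : List (String × List (String × Int))) (v : List String) : Nat :=
  (g.map Prod.fst).countP (fun k => !v.contains k)

-- bound on any neighbour-list length
def pvK (g : List (String × List (String × Int))) : Nat :=
  (g.map (fun p => p.2.length)).foldr max 0 + 1

theorem pvMu_append_le (g : List (String × List (String × Int))) (v d : List String) :
    pvMu g (v ++ d) ≤ pvMu g v := by
  unfold pvMu
  apply List.countP_mono_left
  intro a _ h
  simp only [List.contains_append, Bool.not_eq_true', Bool.or_eq_false_iff] at h ⊢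
  exact h.1

theorem pvMu_append_lt (g : List (String × List (String × Int))) (v : List String) (c : String)
    (hmem : c ∈ g.map Prod.fst) (hc : v.contains c = false) :
    pvMu g (v ++ [c]) < pvMu g v := by
  unfold pvMu
  induction g with
  | nil => simp at hmem
  | cons p rest ih =>
    simp only [List.map_cons, List.countP_cons] at hmem ⊢
    have hle : ((if (!(v ++ [c]).contains p.1) = true then 1 else 0)
        ≤ (if (!v.contains p.1) = true then 1 else 0 : Nat)) := by
      by_cases hk : p.1 ∈ v
      · have h3 : ((v ++ [c]).contains p.1) = true := by simp [hk]
        simp [hk]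
      · have h3 : (!v.contains p.1) = true := by simp [hk]
        rw [if_pos h3]
        split_ifs <;> omega
    rcases List.mem_cons.mp hmem with h | h
    · have h1 : (!v.contains p.1) = true := by rw [← h, hc]; rfl
      have h2 : (!(v ++ [c]).contains p.1) = false := by
        rw [← h]
        have h4 : (v ++ [c]).contains c = true := by simp
        rw [h4]; rfl
      have e1 : (if (!v.contains p.1) = true then 1 else 0 : Nat) = 1 := by rw [if_pos h1]
      have e2 : (if (!(v ++ [c]).contains p.1) = true then 1 else 0 : Nat) = 0 := by
        rw [h2]; rfl
      rw [e1, e2]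
      have hg := pvMu_append_le rest v [c]
      unfold pvMu at hg
      omega
    · have hr := ih h
      omega

theorem pvGetNbrs?_mem (g : List (String × List (String × Int))) (k : String)
    (nv : List (String × Int)) (h : pvGetNbrs? g k = some nv) :
    k ∈ g.map Prod.fst ∧ nv.length < pvK g := by
  induction g with
  | nil => simp [pvGetNbrs?] at h
  | cons p rest ih =>
    unfold pvGetNbrs? at h
    unfold pvK at *
    by_cases hk : p.1 = k
    · simp [hk] at h
      subst h
      constructor
      · simp [hk]
      · simp only [List.map_cons, List.foldr_cons]
        omega
    · simp [hk] at h
      rcases ih h with ⟨h1, h2⟩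
      constructor
      · simp [h1]
      · simp only [List.map_cons, List.foldr_cons] at *
        omega

-- ===== PORT A =====
-- A's recursion, threading the mutated `visited` list: each call returns
-- (max_path, newly appended visited nodes); pvBfsLoopA is A's `for neighbour …` loop.
mutual
def pvBfsAux (g : List (String × List (String × Int))) (c : String) (s : Int)
    (v : List String) : Int × List String :=
  match h : pvGetNbrs? g c with
  | none => (s, [])
  | some nbrs =>
    let q := pvBfsLoopA g nbrs s s (v ++ [c])
    (q.1, c :: q.2)
termination_by (pvMu g v + (if c ∈ v then 1 else 0), pvK g)
decreasing_by
  rcases pvGetNbrs?_mem g c _ h with ⟨hmem, hlen⟩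
  by_cases hc : c ∈ v
  · rcases lt_or_eq_of_le (pvMu_append_le g v [c]) with hlt | heq
    · exact Prod.Lex.left _ _ (by rw [if_pos hc]; omega)
    · rw [heq, if_pos hc]
      exact Prod.Lex.right _ hlen
  · have h1 := pvMu_append_lt g v c hmem (by simpa using hc)
    have e : (pvMu g v + if c ∈ v then 1 else 0) = pvMu g v := by simp [hc]
    rw [e]
    rcases Nat.lt_or_ge (pvMu g (v ++ [c]) + 1) (pvMu g v) with hlt | hge
    · exact Prod.Lex.left _ _ hlt
    · have heq : pvMu g (v ++ [c]) + 1 = pvMu g v := by omega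
      rw [← heq]
      exact Prod.Lex.right _ hlen

def pvBfsLoopA (g : List (String × List (String × Int))) (lst : List (String × Int))
    (s : Int) (mx : Int) (v : List String) : Int × List String :=
  match lst with
  | [] => (mx, [])
  | (n, w) :: rest =>
    if v.contains n then pvBfsLoopA g rest s mx v
    else
      let p := pvBfsAux g n (s + w) v
      let q := pvBfsLoopA g rest s (max mx p.1) (v ++ p.2)
      (q.1, p.2 ++ q.2)
termination_by (pvMu g v + 1, lst.length)
decreasing_by
  · exact Prod.Lex.right _ (by simp)
  · rename_i hn
    have hm : n ∉ v := by simpa using hn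
    exact Prod.Lex.left _ _ (by rw [if_neg hm]; omega)
  · show Prod.Lex (fun a₁ a₂ => a₁ < a₂) (fun a₁ a₂ => a₁ < a₂)
      (pvMu g (v ++ p.2) + 1, rest.length) (pvMu g v + 1, ((n, w) :: rest).length)
    rcases lt_or_eq_of_le (pvMu_append_le g v p.2) with hlt | heq
    · exact Prod.Lex.left _ _ (by omega)
    · rw [heq]
      exact Prod.Lex.right _ (by simp)
end

def bfs (graph : List (String × List (String × Int))) (current : String) (current_sum : Int) (visited : List String) : Int :=
  (pvBfsAux graph current current_sum visited).1

-- ===== PORT B =====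
-- Source B's dict indexing, written as its own first-match scan (takes the key first)
def pvLookup (k : String) : List (String × List (String × Int)) → Option (List (String × Int))
  | [] => none
  | e :: es => if e.1 = k then some e.2 else pvLookup k es

theorem pvLookup_eq (k : String) (g : List (String × List (String × Int))) :
    pvLookup k g = pvGetNbrs? g k := by
  induction g with
  | nil => rfl
  | cons e es ih => unfold pvLookup pvGetNbrs?; rw [ih]

-- Source B's `while stack` loop: head of the list is the top of the stack (extend-with-
-- reversed + pop-from-end = prepend the mapped neighbour list in order, pop the head);
-- returns the list of accumulated sums appended to `sums`, in pop order.
def pvStackSums (g : List (String × List (String × Int))) (stack : List (String × Int))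
    (v : List String) : List Int :=
  match stack with
  | [] => []
  | (node, acc) :: rest =>
    if node ∈ v then pvStackSums g rest v
    else
      match h : pvLookup node g with
      | none => acc :: pvStackSums g rest v
      | some nbrs =>
        acc :: pvStackSums g (nbrs.map (fun p => (p.1, acc + p.2)) ++ rest) (v ++ [node])
termination_by (pvMu g v, stack.length)
decreasing_by
  · exact Prod.Lex.right _ (by simp)
  · exact Prod.Lex.right _ (by simp)
  · have hn : ¬ node ∈ v := by assumption
    rw [pvLookup_eq] at h
    rcases pvGetNbrs?_mem g node _ h with ⟨hmem, _⟩
    exact Prod.Lex.left _ _ (pvMu_append_lt g v node hmem (by simpa using hn))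

def bfs_alt (graph : List (String × List (String × Int))) (current : String) (current_sum : Int) (visited : List String) : Int :=
  match pvLookup current graph with
  | none => current_sum
  | some nbrs =>
    -- sums = [current_sum] ++ collected;  max(sums) over the nonempty Int list is the
    -- left fold of `max` seeded with its first element
    (pvStackSums graph (nbrs.map (fun p => (p.1, current_sum + p.2))) (visited ++ [current])).foldl max current_sum

-- ===== PRECONDITION & SPEC =====
def Spec_bfs (graph : List (String × List (String × Int))) (current : String) (current_sum : Int) (visited : List String) (out : Int) : Prop := out = bfs_alt graph current current_sum visited
instance (graph : List (String × List (String × Int))) (current : String) (current_sum : Int) (visited : List String) (out : Int) : Decidable (Spec_bfs graph current current_sum visited out) := by unfold Spec_bfs; infer_instance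

-- ===== CLAIM (what is proved, stated in full; the proofs are below) =====
def Claim_equal_bfs : Prop := ∀ (graph : List (String × List (String × Int))) (current : String) (current_sum : Int) (visited : List String), Dom_bfs graph current current_sum visited → Spec_bfs graph current current_sum visited (bfs graph current current_sum visited)

-- ===== LEMMAS AND PROOFS =====

-- running-max view of B's stack loop (proof-side only): fold of max over the collected sums
def pvBfsLoopB (g : List (String × List (String × Int))) (stack : List (String × Int))
    (best : Int) (v : List String) : Int :=
  match stack with
  | [] => best
  | (node, acc) :: rest =>
    if v.contains node then pvBfsLoopB g rest best v
    else
      match h : pvGetNbrs? g node with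
      | none => pvBfsLoopB g rest (max best acc) v
      | some nbrs =>
        pvBfsLoopB g (nbrs.map (fun p => (p.1, acc + p.2)) ++ rest) (max best acc) (v ++ [node])
termination_by (pvMu g v, stack.length)
decreasing_by
  · exact Prod.Lex.right _ (by simp)
  · exact Prod.Lex.right _ (by simp)
  · have hn : ¬ v.contains node = true := by assumption
    rcases pvGetNbrs?_mem g node _ h with ⟨hmem, _⟩
    exact Prod.Lex.left _ _ (pvMu_append_lt g v node hmem (by simpa using hn))

-- equation lemmas for the dependent matches
theorem pvBfsAux_none (g : List (String × List (String × Int))) (c : String) (s : Int)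
    (v : List String) (h : pvGetNbrs? g c = none) : pvBfsAux g c s v = (s, []) := by
  unfold pvBfsAux
  split <;> simp_all

theorem pvBfsAux_some (g : List (String × List (String × Int))) (c : String) (s : Int)
    (v : List String) (nbrs : List (String × Int)) (h : pvGetNbrs? g c = some nbrs) :
    pvBfsAux g c s v =
      ((pvBfsLoopA g nbrs s s (v ++ [c])).1, c :: (pvBfsLoopA g nbrs s s (v ++ [c])).2) := by
  unfold pvBfsAux
  split <;> simp_all

theorem pvBfsLoopB_cons_visited (g : List (String × List (String × Int))) (node : String)
    (acc : Int) (rest : List (String × Int)) (best : Int) (v : List String)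
    (hn : v.contains node = true) :
    pvBfsLoopB g ((node, acc) :: rest) best v = pvBfsLoopB g rest best v := by
  rw [pvBfsLoopB]
  simp only [hn, if_true]

theorem pvBfsLoopB_cons_none (g : List (String × List (String × Int))) (node : String)
    (acc : Int) (rest : List (String × Int)) (best : Int) (v : List String)
    (hn : v.contains node = false) (h : pvGetNbrs? g node = none) :
    pvBfsLoopB g ((node, acc) :: rest) best v = pvBfsLoopB g rest (max best acc) v := by
  rw [pvBfsLoopB]
  simp only [hn, Bool.false_eq_true, if_false]
  split <;> simp_all

theorem pvBfsLoopB_cons_some (g : List (String × List (String × Int))) (node : String)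
    (acc : Int) (rest : List (String × Int)) (best : Int) (v : List String)
    (nbrs : List (String × Int)) (hn : v.contains node = false)
    (h : pvGetNbrs? g node = some nbrs) :
    pvBfsLoopB g ((node, acc) :: rest) best v =
      pvBfsLoopB g (nbrs.map (fun p => (p.1, acc + p.2)) ++ rest) (max best acc) (v ++ [node]) := by
  rw [pvBfsLoopB]
  simp only [hn, Bool.false_eq_true, if_false]
  split <;> simp_all

-- the fold of max over B's collected sums IS the running-max loop
theorem pvStackSums_foldl_max (g : List (String × List (String × Int)))
    (stack : List (String × Int)) (v : List String) (b : Int) :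
    (pvStackSums g stack v).foldl max b = pvBfsLoopB g stack b v := by
  induction stack, v using pvStackSums.induct (g := g) generalizing b with
  | case1 v => simp [pvStackSums, pvBfsLoopB]
  | case2 v node acc rest hn ih =>
    have hc : v.contains node = true := by simpa using hn
    rw [pvStackSums, pvBfsLoopB_cons_visited g node acc rest b v hc]
    simp only [hn, if_true]
    exact ih b
  | case3 v node acc rest hn h ih =>
    have hc : v.contains node = false := by simpa using hn
    have h2 : pvGetNbrs? g node = none := by rw [← pvLookup_eq]; exact h
    rw [pvBfsLoopB_cons_none g node acc rest b v hc h2]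
    unfold pvStackSums
    simp only [hn, if_false]
    split <;> simp_all [List.foldl_cons]
  | case4 v node acc rest hn nbrs h ih =>
    have hc : v.contains node = false := by simpa using hn
    have h2 : pvGetNbrs? g node = some nbrs := by rw [← pvLookup_eq]; exact h
    rw [pvBfsLoopB_cons_some g node acc rest b v nbrs hc h2]
    unfold pvStackSums
    simp only [hn, if_false]
    split <;> simp_all [List.foldl_cons]

-- A's loop result is its running max `mx` joined with values independent of `mx`
theorem pvBfsLoopA_max (g : List (String × List (String × Int))) (lst : List (String × Int))
    (s : Int) (a m : Int) (v : List String) :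
    pvBfsLoopA g lst s (max a m) v =
      (max a (pvBfsLoopA g lst s m v).1, (pvBfsLoopA g lst s m v).2) := by
  induction lst generalizing a m v with
  | nil => simp [pvBfsLoopA]
  | cons p rest ih =>
    obtain ⟨n, w⟩ := p
    by_cases hn : v.contains n = true
    · simp only [pvBfsLoopA, hn, if_true]
      exact ih a m v
    · have hx := ih a (max m (pvBfsAux g n (s + w) v).1) (v ++ (pvBfsAux g n (s + w) v).2)
      simp only [pvBfsLoopA, hn, Bool.false_eq_true, if_false, max_assoc, hx]

-- B's running-max stack loop over the mapped neighbour list computes A's `for neighbour …`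
-- loop; strong induction on the number of unvisited graph keys (outer), neighbour list (inner)
theorem pvBridgeLoop (g : List (String × List (String × Int))) :
    ∀ (k : Nat) (v : List String), pvMu g v ≤ k →
      ∀ (lst : List (String × Int)) (s mx : Int) (rest : List (String × Int)),
        pvBfsLoopB g (lst.map (fun p => (p.1, s + p.2)) ++ rest) mx v =
          pvBfsLoopB g rest (pvBfsLoopA g lst s mx v).1 (v ++ (pvBfsLoopA g lst s mx v).2) := by
  intro k
  induction k with
  | zero =>
    intro v hv lst s mx rest
    induction lst generalizing mx with
    | nil => simp [pvBfsLoopA]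
    | cons p rest' ihl =>
      obtain ⟨n, w⟩ := p
      by_cases hn : v.contains n = true
      · rw [List.map_cons, List.cons_append, pvBfsLoopB_cons_visited g n (s + w)
          (rest'.map (fun q => (q.1, s + q.2)) ++ rest) mx v hn, ihl mx]
        simp only [pvBfsLoopA, hn, if_true]
      · have hcf : v.contains n = false := by simpa using hn
        cases hg : pvGetNbrs? g n with
        | none =>
          rw [List.map_cons, List.cons_append, pvBfsLoopB_cons_none g n (s + w)
            (rest'.map (fun q => (q.1, s + q.2)) ++ rest) mx v hcf hg, ihl (max mx (s + w))]
          simp only [pvBfsLoopA, hn, Bool.false_eq_true, if_false,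
            pvBfsAux_none g n (s + w) v hg]
          simp
        | some nbrs =>
          exfalso
          rcases pvGetNbrs?_mem g n _ hg with ⟨hmem, _⟩
          have := pvMu_append_lt g v n hmem hcf
          omega
  | succ k ih =>
    intro v hv lst s mx rest
    induction lst generalizing mx with
    | nil => simp [pvBfsLoopA]
    | cons p rest' ihl =>
      obtain ⟨n, w⟩ := p
      by_cases hn : v.contains n = true
      · rw [List.map_cons, List.cons_append, pvBfsLoopB_cons_visited g n (s + w)
          (rest'.map (fun q => (q.1, s + q.2)) ++ rest) mx v hn, ihl mx]
        simp only [pvBfsLoopA, hn, if_true]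
      · have hcf : v.contains n = false := by simpa using hn
        cases hg : pvGetNbrs? g n with
        | none =>
          rw [List.map_cons, List.cons_append, pvBfsLoopB_cons_none g n (s + w)
            (rest'.map (fun q => (q.1, s + q.2)) ++ rest) mx v hcf hg, ihl (max mx (s + w))]
          simp only [pvBfsLoopA, hn, Bool.false_eq_true, if_false,
            pvBfsAux_none g n (s + w) v hg]
          simp
        | some nbrs =>
          rcases pvGetNbrs?_mem g n _ hg with ⟨hmem, _⟩
          have hlt := pvMu_append_lt g v n hmem hcf
          have hμ2 := pvMu_append_le g (v ++ [n])
            (pvBfsLoopA g nbrs (s + w) (s + w) (v ++ [n])).2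
          rw [List.map_cons, List.cons_append, pvBfsLoopB_cons_some g n (s + w)
            (rest'.map (fun q => (q.1, s + q.2)) ++ rest) mx v nbrs hcf hg,
            ih (v ++ [n]) (by omega) nbrs (s + w) (max mx (s + w))
              (rest'.map (fun q => (q.1, s + q.2)) ++ rest),
            pvBfsLoopA_max g nbrs (s + w) mx (s + w) (v ++ [n]),
            ih (v ++ [n] ++ (pvBfsLoopA g nbrs (s + w) (s + w) (v ++ [n])).2) (by omega)
              rest' s (max mx (pvBfsLoopA g nbrs (s + w) (s + w) (v ++ [n])).1) rest]
          simp only [pvBfsLoopA, hn, Bool.false_eq_true, if_false,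
            pvBfsAux_some g n (s + w) v nbrs hg]
          simp [List.append_assoc]

-- ===== VERDICT (by name: the statement is the Claim_ definition above) =====
theorem bfs_spec : Claim_equal_bfs := by
  intro graph current current_sum visited _
  unfold Spec_bfs bfs
  cases h : pvGetNbrs? graph current with
  | none =>
    have hl : pvLookup current graph = none := by rw [pvLookup_eq, h]
    simp [bfs_alt, hl, pvBfsAux_none graph current current_sum visited h]
  | some nbrs =>
    have hl : pvLookup current graph = some nbrs := by rw [pvLookup_eq, h]
    simp only [bfs_alt, hl]
    rw [pvBfsAux_some graph current current_sum visited nbrs h,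
      pvStackSums_foldl_max graph _ (visited ++ [current]) current_sum]
    have hb := pvBridgeLoop graph (pvMu graph (visited ++ [current])) (visited ++ [current])
      (le_refl _) nbrs current_sum current_sum []
    rw [List.append_nil] at hb
    simp [hb, pvBfsLoopB]
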